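-- pv_equiv track=rewrite | github.com/SimonCalo/Python_challenges | Reverse words with delimiters/reverse_words_delimiters.py | generate_two_lists
-- ===== SOURCE A (Python) =====
-- def are_characters_of_different_nature(c1: str, c2: str) -> bool:
--
--   """
--   Helper function to check whether two characters are of different nature.
--
--   The function returns True if one of the characters is a letter and the other is not.
--
--   Parameters:
--   c1 (str): The first character.
--
--   c2 (str): The second character.
--
--   Returns:
--   bool: Whether the two characters are not both letters.
--   """
--
--
--   if c1.isalpha():
--     return not c2.isalpha()
--   else:
--     return c2.isalpha()
--
-- def generate_two_lists(input_string: str) -> tuple: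
--
--   """
--   Helper function to generate a list of letters and a list of delimiters.
--
--   The function returns a tuple containing the list of words and the list of delimiters, both in the order in which they appear in input_string.
--
--   Parameters:
--   input_string (str): The string from which we want to extract words and delimiters.
--
--   Returns:
--   tuple: The list of words and the list of delimiters.
--   """
--
--   # Initialise useful objects.
--   index = 0
--   list_to_append_things_in = []
--   other_list = []
--   str_to_append = ""
--
--   # Loop over input_string up to the last characters, in order to avoid errors when checking whether a character and the following one are of different nature.
--   while index < len(input_string) - 1:
--
--     # Add the character at the given index to the string that will be appended to the current list.
--     str_to_append += input_string[index]
--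
--     # Check if the current character and the following one are of different nature.
--     # If they are, then we should append the current string to a list, and re-start the process by re-initialising an empty string.
--     if are_characters_of_different_nature(input_string[index], input_string[index+1]):
--       list_to_append_things_in.append(str_to_append)
--       str_to_append = ""
--
--       # Reverse the roles of list_to_append_things_in and other_list, because we want to make sure that one them only contains words, and the other only contains delimiters.
--       new_list_to_append_things_in = other_list[:]
--       other_list = list_to_append_things_in[:]
--       list_to_append_things_in = new_list_to_append_things_in
--
--     # Proceed to the next character in input_string.
--     index += 1
--
--   # Add the last character to the final substring, and append it to the last list that was being used to append strings in.
--   list_to_append_things_in.append(str_to_append + input_string[-1])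
--
--   # Based on the last character of input_string, order the two lists such that the first one is always the one containing words, and the second the one containing delimiters.
--   if input_string[-1].isalpha():
--     return list_to_append_things_in, other_list
--   else:
--     return other_list, list_to_append_things_in
-- ===== SOURCE B (Python) =====
-- from itertools import groupby
--
-- def generate_two_lists(input_string):
--     words, delimiters = [], []
--     for is_alpha, grp in groupby(input_string, key=str.isalpha):
--         (words if is_alpha else delimiters).append("".join(grp))
--     return words, delimiters
-- ===== Notes on version B (the rewrite author's own statement) =====
-- stated objective: simpler
-- what changed: Replaces the pairwise next-character comparison with manual string accumulation and the list-reference swapping trick (which copies both lists at every run boundary) by itertools.groupby over str.isalpha, appending each materialized run directly to the words or delimiters list.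
import Mathlib
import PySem

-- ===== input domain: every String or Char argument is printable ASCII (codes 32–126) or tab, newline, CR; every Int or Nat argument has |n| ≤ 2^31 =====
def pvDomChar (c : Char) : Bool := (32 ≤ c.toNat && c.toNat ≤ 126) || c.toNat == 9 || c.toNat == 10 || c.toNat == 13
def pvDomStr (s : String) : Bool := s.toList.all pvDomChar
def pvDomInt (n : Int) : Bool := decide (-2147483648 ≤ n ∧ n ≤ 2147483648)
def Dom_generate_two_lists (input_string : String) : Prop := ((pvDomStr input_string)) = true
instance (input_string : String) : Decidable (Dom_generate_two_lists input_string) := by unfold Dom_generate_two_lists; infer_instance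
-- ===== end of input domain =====

-- B replaces A's pairwise look-ahead comparison and list-reference swapping by grouping the
-- string into maximal same-nature runs and appending each run to the right list (objective: simpler).

-- ===== PORT A =====
-- helper: c1.isalpha() xor c2.isalpha() (PySem.Chars.isalpha is exact Python isalpha on the ASCII domain)
def are_characters_of_different_nature (c1 c2 : Char) : Bool :=
  if PySem.Chars.isalpha c1 then !(PySem.Chars.isalpha c2) else PySem.Chars.isalpha c2

-- A's while loop: state (str_to_append, list_to_append_things_in, other_list); the current char is
-- compared with the next one; on the last char the final append and the isalpha-ordering happen.
def pvLoopA : List Char → List Char → List String → List String → List String × List String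
  | [], _, lst, other => (lst, other)   -- unreachable under Pre_ (Python raises IndexError on "")
  | c :: rest, acc, lst, other =>
    match rest with
    | [] =>
      let lst' := lst ++ [String.mk (acc ++ [c])]
      if PySem.Chars.isalpha c then (lst', other) else (other, lst')
    | c2 :: _ =>
      let acc' := acc ++ [c]
      if are_characters_of_different_nature c c2 then
        pvLoopA rest [] other (lst ++ [String.mk acc'])
      else
        pvLoopA rest acc' lst other

def generate_two_lists (input_string : String) : List String × List String :=
  pvLoopA input_string.toList [] [] []

-- ===== PORT B =====
-- Source B's itertools.groupby(input_string, key=str.isalpha): list of (key, materialized run)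
def pvGroups : List Char → List (Bool × List Char)
  | [] => []
  | c :: rest =>
    (PySem.Chars.isalpha c,
     c :: rest.takeWhile (fun d => PySem.Chars.isalpha d == PySem.Chars.isalpha c)) ::
    pvGroups (rest.dropWhile (fun d => PySem.Chars.isalpha d == PySem.Chars.isalpha c))
termination_by l => l.length
decreasing_by simpa using Nat.lt_succ_of_le (List.length_dropWhile_le ..)

def generate_two_lists_alt (input_string : String) : List String × List String :=
  let gs := pvGroups input_string.toList
  ((gs.filter (fun p => p.1)).map (fun p => String.mk p.2),
   (gs.filter (fun p => !p.1)).map (fun p => String.mk p.2))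

-- ===== PRECONDITION & SPEC =====
-- Pre_ excludes only the empty string, on which A raises IndexError (input_string[-1]).
def Pre_generate_two_lists (input_string : String) : Prop := input_string ≠ ""
instance (input_string : String) : Decidable (Pre_generate_two_lists input_string) := by
  unfold Pre_generate_two_lists; infer_instance
def pvWitness_generate_two_lists : String := "ab, cd"

def Spec_generate_two_lists (input_string : String) (out : List String × List String) : Prop :=
  out = generate_two_lists_alt input_string
instance (input_string : String) (out : List String × List String) :
    Decidable (Spec_generate_two_lists input_string out) := by
  unfold Spec_generate_two_lists; infer_instance

-- ===== CLAIM (what is proved, stated in full; the proofs are below) =====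
def Claim_equal_generate_two_lists : Prop := ∀ (input_string : String), Dom_generate_two_lists input_string → Pre_generate_two_lists input_string → Spec_generate_two_lists input_string (generate_two_lists input_string)

-- ===== LEMMAS AND PROOFS =====

theorem takeWhile_of_all {α : Type} (p : α → Bool) (l l' : List α)
    (h : ∀ x ∈ l, p x = true) : (l ++ l').takeWhile p = l ++ l'.takeWhile p := by
  induction l with
  | nil => rfl
  | cons a t ih =>
    simp only [List.cons_append, List.takeWhile_cons, h a (by simp)]
    simp [ih (fun x hx => h x (by simp [hx]))]

theorem dropWhile_of_all {α : Type} (p : α → Bool) (l l' : List α)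
    (h : ∀ x ∈ l, p x = true) : (l ++ l').dropWhile p = l'.dropWhile p := by
  induction l with
  | nil => rfl
  | cons a t ih =>
    simp only [List.cons_append, List.dropWhile_cons, h a (by simp)]
    simp [ih (fun x hx => h x (by simp [hx]))]

theorem pvGroups_homog (acc : List Char) (c : Char) (rest : List Char)
    (h : ∀ d ∈ acc, PySem.Chars.isalpha d = PySem.Chars.isalpha c) :
    pvGroups (acc ++ c :: rest) =
      (PySem.Chars.isalpha c,
       acc ++ c :: rest.takeWhile (fun d => PySem.Chars.isalpha d == PySem.Chars.isalpha c)) ::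
      pvGroups (rest.dropWhile (fun d => PySem.Chars.isalpha d == PySem.Chars.isalpha c)) := by
  cases acc with
  | nil => simp [pvGroups]
  | cons a t =>
    have ha : PySem.Chars.isalpha a = PySem.Chars.isalpha c := h a (by simp)
    have ht : ∀ x ∈ t, (fun d => PySem.Chars.isalpha d == PySem.Chars.isalpha c) x = true := by
      intro x hx; simp [h x (by simp [hx])]
    rw [List.cons_append, pvGroups, ha,
        takeWhile_of_all _ t (c :: rest) ht, dropWhile_of_all _ t (c :: rest) ht]
    simp [List.takeWhile_cons]

theorem pvLoopA_eq (rest : List Char) : ∀ (c : Char) (acc : List Char) (lst other : List String),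
    (∀ d ∈ acc, PySem.Chars.isalpha d = PySem.Chars.isalpha c) →
    pvLoopA (c :: rest) acc lst other =
      (let gs := pvGroups (acc ++ c :: rest)
       let ws := (gs.filter (fun p => p.1)).map (fun p => String.mk p.2)
       let ds := (gs.filter (fun p => !p.1)).map (fun p => String.mk p.2)
       if PySem.Chars.isalpha c then (lst ++ ws, other ++ ds) else (other ++ ws, lst ++ ds)) := by
  induction rest with
  | nil =>
    intro c acc lst other h
    rw [pvGroups_homog acc c [] h]
    by_cases hb : PySem.Chars.isalpha c = true <;>
      simp [pvLoopA, pvGroups, hb]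
  | cons c2 rest' ih =>
    intro c acc lst other h
    by_cases hb : PySem.Chars.isalpha c2 = PySem.Chars.isalpha c
    · -- same nature: accumulate
      have hdiff : are_characters_of_different_nature c c2 = false := by
        unfold are_characters_of_different_nature
        by_cases hc : PySem.Chars.isalpha c = true <;> simp [hc, hb ▸ hc] <;> simp_all
      have h' : ∀ d ∈ acc ++ [c], PySem.Chars.isalpha d = PySem.Chars.isalpha c2 := by
        intro d hd; rw [hb]
        rcases List.mem_append.1 hd with hd | hd
        · exact h d hd
        · simp at hd; simp [hd]
      rw [pvLoopA, hdiff]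
      simp only [Bool.false_eq_true, if_false]
      rw [ih c2 (acc ++ [c]) lst other h']
      simp only [List.append_assoc, List.cons_append, List.nil_append, hb]
    · -- different nature: flush the run and swap lists
      have hdiff : are_characters_of_different_nature c c2 = true := by
        unfold are_characters_of_different_nature
        by_cases hc : PySem.Chars.isalpha c = true <;> simp [hc] <;> simp_all
      have hp : (fun d => PySem.Chars.isalpha d == PySem.Chars.isalpha c) c2 = false := by
        simp [hb]
      rw [pvLoopA, hdiff]
      simp only [if_true]
      rw [ih c2 [] other (lst ++ [String.mk (acc ++ [c])]) (by simp)]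
      rw [pvGroups_homog acc c (c2 :: rest') h]
      simp only [List.takeWhile_cons, List.dropWhile_cons, hp, List.nil_append]
      by_cases hc : PySem.Chars.isalpha c = true
      · have hc2 : PySem.Chars.isalpha c2 = false := by
          cases h2 : PySem.Chars.isalpha c2 <;> simp_all
        simp [hc, hc2, List.filter, List.append_assoc]
      · have hc' : PySem.Chars.isalpha c = false := by cases h2 : PySem.Chars.isalpha c <;> simp_all
        have hc2 : PySem.Chars.isalpha c2 = true := by
          cases h2 : PySem.Chars.isalpha c2 <;> simp_all
        simp [hc', hc2, List.filter, List.append_assoc]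

-- ===== VERDICT (by name: the statement is the Claim_ definition above) =====
theorem generate_two_lists_spec : Claim_equal_generate_two_lists := by
  intro s _ hpre
  unfold Spec_generate_two_lists generate_two_lists generate_two_lists_alt
  cases hcs : s.toList with
  | nil => exact absurd (String.toList_eq_nil_iff.1 hcs) hpre
  | cons c rest =>
    rw [pvLoopA_eq rest c [] [] [] (by simp)]
    by_cases hc : PySem.Chars.isalpha c = true <;> simp [hc]
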